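-- pv_equiv track=rewrite | github.com/rchoi8/DFO-Clam-Genomes | code/go_term_counts.py | parse_go_field
-- ===== SOURCE A (Python) =====
-- def parse_go_field(field):
--     if not field or field == ".":
--         return set()
--     ids = set()
--     for chunk in field.split("`"):
--         parts = chunk.split("^")
--         if parts and parts[0].startswith("GO:"):
--             ids.add(parts[0])
--     return ids
-- ===== SOURCE B (Python) =====
-- def parse_go_field(field):
--     # Single forward scan: at each chunk start (string start or just after a
--     # backtick), grab the GO: token up to the next '^' or '`', then jump to
--     # the next backtick.  No intermediate split lists are built.
--     if not field or field == ".":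
--         return set()
--     ids = set()
--     n = len(field)
--     i = 0
--     while True:
--         if field.startswith("GO:", i):
--             j = i
--             while j < n and field[j] not in "`^":
--                 j += 1
--             ids.add(field[i:j])
--         k = field.find("`", i)
--         if k == -1:
--             return ids
--         i = k + 1
-- ===== Notes on version B (the rewrite author's own statement) =====
-- stated objective: alternative
-- what changed: Replaced A's split-on-backtick then split-on-caret nested list construction with a single forward scan that tests for a 'GO:' prefix at each chunk start, slices the token up to the next '^'/'`', and jumps directly to the next backtick (str.find), building no intermediate lists.
import Mathlib
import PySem

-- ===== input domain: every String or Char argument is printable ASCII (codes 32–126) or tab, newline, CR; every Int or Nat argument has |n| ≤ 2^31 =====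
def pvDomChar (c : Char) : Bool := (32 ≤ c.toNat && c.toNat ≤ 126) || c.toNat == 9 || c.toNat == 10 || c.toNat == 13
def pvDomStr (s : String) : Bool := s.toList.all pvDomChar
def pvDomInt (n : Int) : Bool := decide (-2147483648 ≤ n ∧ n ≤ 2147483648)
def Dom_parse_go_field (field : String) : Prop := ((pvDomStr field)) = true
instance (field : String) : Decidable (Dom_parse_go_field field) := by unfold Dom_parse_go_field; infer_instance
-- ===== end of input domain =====

-- B replaces A's nested split-on-backtick / split-on-caret passes by one forward scan
-- that extracts each GO: token directly (objective: alternative, same cost).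


-- ===== PORT A =====
-- for chunk in field.split("`"): parts = chunk.split("^"); if parts and parts[0].startswith("GO:"): ids.add(parts[0])
def parse_go_field (field : String) : List String :=
  if field = "" ∨ field = "." then [] else
    (PySem.Chars.splitOn field.toList ['`']).foldl
      (fun ids chunk =>
        let parts := PySem.Chars.splitOn chunk ['^']
        match parts with
        | [] => ids
        | p0 :: _ =>
          if PySem.Chars.startswith p0 ['G', 'O', ':'] then PySem.Set.add ids (String.ofList p0)
          else ids)
      []

-- ===== PORT B =====
-- one scan: at a chunk start, if it begins "GO:" take chars up to '^'/'`' (Source B's inner while);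
-- then jump past the next '`' (Source B's field.find("`", i); return if none) — ported as dropWhile.
def parse_go_field_altGo : List Char → PySem.Set String → PySem.Set String
  | [], ids => ids
  | c :: cs, ids =>
    let ids' :=
      if ['G', 'O', ':'].isPrefixOf (c :: cs) then
        PySem.Set.add ids (String.ofList ((c :: cs).takeWhile (fun d => !(d == '`' || d == '^'))))
      else ids
    match h : (c :: cs).dropWhile (fun d => d != '`') with
    | [] => ids'
    | _ :: t => parse_go_field_altGo t ids'
  termination_by l _ => l.length
  decreasing_by
    have hle := List.length_dropWhile_le (fun d => d != '`') (c :: cs)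
    rw [h] at hle
    simp at hle ⊢
    omega

def parse_go_field_alt (field : String) : List String :=
  if field = "" ∨ field = "." then [] else parse_go_field_altGo field.toList []

-- ===== PRECONDITION & SPEC =====
def Spec_parse_go_field (field : String) (out : List String) : Prop := out = parse_go_field_alt field
instance (field : String) (out : List String) : Decidable (Spec_parse_go_field field out) := by unfold Spec_parse_go_field; infer_instance

-- ===== CLAIM (what is proved, stated in full; the proofs are below) =====
def Claim_equal_parse_go_field : Prop := ∀ (field : String), Dom_parse_go_field field → Spec_parse_go_field field (parse_go_field field)

-- ===== LEMMAS AND PROOFS =====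

-- reference single-character split (structural recursion, no fuel)
def splitC (c : Char) (l : List Char) : List (List Char) :=
  let pre := l.takeWhile (fun d => d != c)
  match h : l.dropWhile (fun d => d != c) with
  | [] => [pre]
  | _ :: t => pre :: splitC c t
  termination_by l.length
  decreasing_by
    have hle := List.length_dropWhile_le (fun d => d != c) l
    rw [h] at hle
    simp at hle ⊢
    omega

def consHead (pre : List Char) : List (List Char) → List (List Char)
  | [] => [pre]
  | p :: ps => (pre ++ p) :: ps

theorem splitC_ne_nil (c : Char) (l : List Char) : splitC c l ≠ [] := by
  rw [splitC]
  split <;> simp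

theorem splitC_nil (c : Char) : splitC c [] = [[]] := by
  rw [splitC]
  split <;> simp_all

theorem splitC_cons_self (c : Char) (rest : List Char) :
    splitC c (c :: rest) = [] :: splitC c rest := by
  rw [splitC]
  simp only [List.takeWhile_cons, bne_self_eq_false, Bool.false_eq_true, if_false]
  split <;> simp_all

theorem splitC_cons_ne (c x : Char) (rest : List Char) (hx : x ≠ c) :
    splitC c (x :: rest) = consHead [x] (splitC c rest) := by
  have hbne : (x != c) = true := by simp [hx]
  rw [splitC, splitC]
  simp only [List.takeWhile_cons, hbne, if_true]
  split <;> split <;> simp_all [consHead]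

theorem consHead_nil (ps : List (List Char)) (h : ps ≠ []) : consHead [] ps = ps := by
  cases ps with
  | nil => exact absurd rfl h
  | cons p ps => simp [consHead]

theorem go_spec (c : Char) : ∀ (fuel : Nat) (l cur : List Char) (acc : List (List Char)),
    l.length < fuel →
    PySem.Chars.splitOn.go [c] fuel l cur acc = acc.reverse ++ consHead cur.reverse (splitC c l) := by
  intro fuel
  induction fuel with
  | zero => intro l cur acc h; omega
  | succ f ih =>
    intro l cur acc h
    cases l with
    | nil =>
      rw [PySem.Chars.splitOn.go]
      all_goals simp [splitC_nil, consHead]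
    | cons x rest =>
      rw [PySem.Chars.splitOn.go]
      simp only [List.length_cons] at h
      by_cases hx : x = c
      · subst hx
        have hpre : [x].isPrefixOf (x :: rest) = true := by simp [List.isPrefixOf]
        simp only [hpre, if_true, List.length_cons, List.length_nil, Nat.zero_add,
          List.drop_succ_cons, List.drop_zero]
        rw [ih rest [] (cur.reverse :: acc) (by omega)]
        rw [splitC_cons_self]
        cases hs : splitC x rest with
        | nil => exact absurd hs (splitC_ne_nil x rest)
        | cons p ps => simp [consHead]
      · have hpre : [c].isPrefixOf (x :: rest) = false := by
          simp [List.isPrefixOf]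
          intro hcx; exact absurd hcx.symm hx
        simp only [hpre, Bool.false_eq_true, if_false]
        rw [ih rest (x :: cur) acc (by omega)]
        rw [splitC_cons_ne c x rest hx]
        cases hs : splitC c rest with
        | nil => exact absurd hs (splitC_ne_nil _ _)
        | cons p ps => simp [consHead]

theorem splitOn_eq_splitC (c : Char) (l : List Char) :
    PySem.Chars.splitOn l [c] = splitC c l := by
  unfold PySem.Chars.splitOn
  rw [go_spec c (l.length + 1) l [] [] (by omega)]
  simp [consHead_nil _ (splitC_ne_nil _ _)]

theorem isPrefixOf_takeWhile (pre : List Char) (q : Char → Bool)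
    (hpre : ∀ a ∈ pre, q a = true) :
    ∀ l : List Char, pre.isPrefixOf (l.takeWhile q) = pre.isPrefixOf l := by
  induction pre with
  | nil => intro l; simp [List.isPrefixOf]
  | cons a pre' ih =>
    intro l
    cases l with
    | nil => simp
    | cons b l' =>
      by_cases hb : q b = true
      · simp only [List.takeWhile_cons, hb, if_true, List.isPrefixOf]
        rw [ih (fun a ha => hpre a (List.mem_cons_of_mem _ ha)) l']
      · have hab : (a == b) = false := by
          by_contra hcon
          simp at hcon
          subst hcon
          exact hb (hpre a (List.mem_cons_self))
        simp only [List.takeWhile_cons, hb, Bool.false_eq_true, if_false]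
        simp [List.isPrefixOf, hab]

theorem splitC_head (c : Char) (l : List Char) :
    ∃ ps, splitC c l = (l.takeWhile (fun d => d != c)) :: ps := by
  rw [splitC]
  split
  · exact ⟨[], rfl⟩
  · exact ⟨_, rfl⟩

theorem token_eq (l : List Char) :
    (l.takeWhile (fun d => d != '`')).takeWhile (fun d => d != '^') =
      l.takeWhile (fun d => !(d == '`' || d == '^')) := by
  rw [List.takeWhile_takeWhile]
  congr 1
  funext d
  by_cases h1 : d = '`' <;> by_cases h2 : d = '^' <;> simp [h1, h2]

theorem step_eq (l : List Char) (ids : PySem.Set String) :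
    (if ['G', 'O', ':'].isPrefixOf l then
        PySem.Set.add ids (String.ofList (l.takeWhile (fun d => !(d == '`' || d == '^'))))
      else ids) =
    (let parts := PySem.Chars.splitOn (l.takeWhile (fun d => d != '`')) ['^']
     match parts with
     | [] => ids
     | p0 :: _ =>
       if PySem.Chars.startswith p0 ['G', 'O', ':'] then PySem.Set.add ids (String.ofList p0)
       else ids) := by
  obtain ⟨ps, hps⟩ := splitC_head '^' (l.takeWhile (fun d => d != '`'))
  rw [splitOn_eq_splitC, hps]
  simp only [PySem.Chars.startswith]
  have h3 : ∀ a ∈ ['G', 'O', ':'], (!(a == '`' || a == '^')) = true := by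
    intro a ha; fin_cases ha <;> rfl
  simp only [token_eq, isPrefixOf_takeWhile _ _ h3]

theorem main_lemma (l : List Char) (ids : PySem.Set String) :
    parse_go_field_altGo l ids =
      (splitC '`' l).foldl
        (fun ids chunk =>
          let parts := PySem.Chars.splitOn chunk ['^']
          match parts with
          | [] => ids
          | p0 :: _ =>
            if PySem.Chars.startswith p0 ['G', 'O', ':'] then PySem.Set.add ids (String.ofList p0)
            else ids)
        ids := by
  generalize hn : l.length = n
  induction n using Nat.strong_induction_on generalizing l ids with
  | _ n ih =>
    cases l with
    | nil =>
      rw [parse_go_field_altGo, splitC_nil]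
      simp [PySem.Chars.splitOn, PySem.Chars.splitOn.go, PySem.Chars.startswith]
    | cons x cs =>
      rw [parse_go_field_altGo]
      rw [splitC]
      cases h : (x :: cs).dropWhile (fun d => d != '`') with
      | nil =>
        simp only [List.foldl_cons, List.foldl_nil]
        exact step_eq (x :: cs) ids
      | cons y t =>
        have hlen : t.length < n := by
          have hle := List.length_dropWhile_le (fun d => d != '`') (x :: cs)
          rw [h] at hle
          simp at hle
          simp only [List.length_cons] at hn
          omega
        simp only [List.foldl_cons]
        rw [ih t.length hlen t _ rfl]
        rw [step_eq (x :: cs) ids]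



-- ===== VERDICT (by name: the statement is the Claim_ definition above) =====
theorem parse_go_field_spec : Claim_equal_parse_go_field := by
  intro field _
  unfold Spec_parse_go_field parse_go_field parse_go_field_alt
  split
  · rfl
  · rw [main_lemma]
    rw [splitOn_eq_splitC]
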